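-- pv_equiv track=rewrite | github.com/Tphuong612/Python_Ptit | BienVaKieuDuLieuDonGian/PY01003_LamTronSo.py | my_round
-- ===== SOURCE A (Python) =====
-- def my_round(x):
--     #xu ly lam tron
--     l = list(x)
--     for i in range(len(l)-1, 0, -1):
--         if int(l[i]) >= 5:
--             l[i] = '0'
--             l[i-1] = str(int(l[i-1]) + 1)
--
--     #cong lai thanh 1 string
--     kq = ''
--     for i in range(len(l)):
--         kq += l[i]
--     return kq
-- ===== SOURCE B (Python) =====
-- def my_round(x):
--     n = len(x)
--     res = []
--     j = 0
--     for i in range(n):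
--         if j <= i:
--             j = i + 1
--             while j < n and x[j] == '4':
--                 j += 1
--         carry = j < n and x[j] >= '5'
--         c = x[i]
--         if i == 0:
--             res.append(str(int(c) + 1) if carry else c)
--         elif c >= '5' or (c == '4' and carry):
--             res.append('0')
--         elif carry:
--             res.append(str(int(c) + 1))
--         else:
--             res.append(c)
--     return ''.join(res)
-- ===== Notes on version B (the rewrite author's own statement) =====
-- stated objective: alternative
-- what changed: A propagates a round-up carry right-to-left by mutating and re-parsing the list in place; B scans left to right in one pass with an amortized lookahead pointer to the next character that is not a four, deciding locally by character comparison whether a carry arrives from the right, so no cell is ever rewritten or re-parsed and no right-to-left pass exists.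
import Mathlib
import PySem

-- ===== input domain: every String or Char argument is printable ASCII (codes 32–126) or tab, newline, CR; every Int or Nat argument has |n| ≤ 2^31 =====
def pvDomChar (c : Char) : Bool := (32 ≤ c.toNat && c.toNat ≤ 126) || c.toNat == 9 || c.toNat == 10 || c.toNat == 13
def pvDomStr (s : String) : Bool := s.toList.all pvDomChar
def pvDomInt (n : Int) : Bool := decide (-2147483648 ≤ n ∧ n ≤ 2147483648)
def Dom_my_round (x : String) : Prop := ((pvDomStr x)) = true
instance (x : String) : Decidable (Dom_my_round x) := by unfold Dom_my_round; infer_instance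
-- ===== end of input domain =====

-- B replaces A's right-to-left in-place carry cascade (which re-parses cells it has already
-- written) by a single LEFT-to-right pass with an amortized lookahead pointer to the next
-- character that is not a four, deciding locally whether a carry arrives from the right
-- (objective: alternative).

-- ===== PORT A =====
-- int(s) with .getD 0: the fallback is never reached on inputs satisfying Pre_my_round
def pyint (s : String) : Int := (PySem.Int.ofStr? s).getD 0

-- the body of A's first loop, lifted to a named helper
def aStep (l : List String) (i : Int) : List String :=
  if pyint (PySem.List.pyGetD l i "") ≥ 5 then
    (l.set i.toNat "0").set (i - 1).toNat
      (PySem.Int.toStr (pyint (PySem.List.pyGetD l (i - 1) "") + 1))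
  else l

def my_round (x : String) : String :=
  let l := x.toList.map (fun c => String.ofList [c])
  let l2 := (PySem.List.pyRange ((l.length : Int) - 1) 0 (-1)).foldl aStep l
  (PySem.List.pyRange 0 ((l2.length : Int))).foldl
    (fun kq i => kq ++ PySem.List.pyGetD l2 i "") ""

-- ===== PORT B =====
def pyintC (c : Char) : Int := pyint (String.ofList [c])

-- B's inner while loop: advance j while x[j] == '4'
def bSkip (l : List Char) (j : Int) : Int :=
  if h : j < (l.length : Int) ∧ PySem.List.pyGetD l j ' ' = '4' then bSkip l (j + 1) else j
termination_by ((l.length : Int) - j).toNat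
decreasing_by omega

-- the body of B's for loop; state = (res, j)
def bStep (l : List Char) (st : List String × Int) (i : Int) : List String × Int :=
  let j := if st.2 ≤ i then bSkip l (i + 1) else st.2
  let carry : Bool := decide (j < (l.length : Int) ∧ '5' ≤ PySem.List.pyGetD l j ' ')
  let c := PySem.List.pyGetD l i ' '
  if i = 0 then
    (st.1 ++ [if carry then PySem.Int.toStr (pyintC c + 1) else String.ofList [c]], j)
  else if '5' ≤ c ∨ (c = '4' ∧ carry = true) then (st.1 ++ ["0"], j)
  else if carry then (st.1 ++ [PySem.Int.toStr (pyintC c + 1)], j)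
  else (st.1 ++ [String.ofList [c]], j)

def my_round_alt (x : String) : String :=
  let l := x.toList
  let st := (PySem.List.pyRange 0 (l.length : Int)).foldl (bStep l) ([], 0)
  PySem.Str.join "" st.1

-- ===== PRECONDITION & SPEC =====
-- A int()-parses every character after the first, and the first one exactly when the rounding
-- carry propagates to it (first non-'4' among the later characters is ≥ '5'); Pre_ admits exactly
-- the inputs where every such parse is of a digit, i.e. exactly where A returns without ValueError.
def Pre_my_round (x : String) : Prop :=
  ((x.toList.drop 1).all Char.isDigit = true) ∧
  ((((x.toList.drop 1).dropWhile (· == '4')).head?.any (fun c => decide ('5' ≤ c))) = true →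
    (x.toList.head?.all Char.isDigit) = true)
instance (x : String) : Decidable (Pre_my_round x) := by unfold Pre_my_round; infer_instance

def pvWitness_my_round : String := "18"

def Spec_my_round (x : String) (out : String) : Prop := out = my_round_alt x
instance (x : String) (out : String) : Decidable (Spec_my_round x out) := by unfold Spec_my_round; infer_instance

-- ===== CLAIM (what is proved, stated in full; the proofs are below) =====
def Claim_equal_my_round : Prop := ∀ (x : String), Dom_my_round x → Pre_my_round x → Spec_my_round x (my_round x)

-- ===== LEMMAS AND PROOFS =====

-- reference computation: process the characters after the first, right to left;
-- returns (the output cells for those positions, the carry into the first position)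
def roundAux : List Char → List String × Bool
  | [] => ([], false)
  | c :: rest =>
    let p := roundAux rest
    let v := pyintC c + (if p.2 then 1 else 0)
    if v ≥ 5 then ("0" :: p.1, true)
    else if p.2 then (PySem.Int.toStr v :: p.1, false)
    else (String.ofList [c] :: p.1, false)

lemma pyGetD_append_cons {α : Type} (u : List α) (v : α) (w : List α) (d : α) :
    PySem.List.pyGetD (u ++ v :: w) (u.length : Int) d = v := by
  rw [PySem.List.pyGetD_natCast]
  simp

lemma set_append_cons {α : Type} (u : List α) (v n : α) (w : List α) :
    (u ++ v :: w).set u.length n = u ++ n :: w := by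
  induction u with
  | nil => simp
  | cons a u ih => simp [ih]

lemma pyintC_bounds (c : Char) (h : c.isDigit = true) : 0 ≤ pyintC c ∧ pyintC c ≤ 9 := by
  simp [Char.isDigit] at h
  obtain ⟨h1, h2⟩ := h
  have h1n : 48 ≤ c.toNat := h1
  have h2n : c.toNat ≤ 57 := h2
  have hk : c.toNat = 48 ∨ c.toNat = 49 ∨ c.toNat = 50 ∨ c.toNat = 51 ∨ c.toNat = 52 ∨
      c.toNat = 53 ∨ c.toNat = 54 ∨ c.toNat = 55 ∨ c.toNat = 56 ∨ c.toNat = 57 := by omega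
  have ho := Char.ofNat_toNat c
  rcases hk with h | h | h | h | h | h | h | h | h | h <;> rw [h] at ho <;> subst ho <;> decide

lemma pyintC_digit (c : Char) (h : c.isDigit = true) :
    (0 ≤ pyintC c ∧ pyintC c ≤ 9) ∧ (5 ≤ pyintC c ↔ '5' ≤ c) ∧ (pyintC c = 4 ↔ c = '4') := by
  simp [Char.isDigit] at h
  obtain ⟨h1, h2⟩ := h
  have h1n : 48 ≤ c.toNat := h1
  have h2n : c.toNat ≤ 57 := h2
  have hk : c.toNat = 48 ∨ c.toNat = 49 ∨ c.toNat = 50 ∨ c.toNat = 51 ∨ c.toNat = 52 ∨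
      c.toNat = 53 ∨ c.toNat = 54 ∨ c.toNat = 55 ∨ c.toNat = 56 ∨ c.toNat = 57 := by omega
  have ho := Char.ofNat_toNat c
  rcases hk with h | h | h | h | h | h | h | h | h | h <;> rw [h] at ho <;> subst ho <;> decide

lemma pyint_toStr (v : Int) (h1 : 1 ≤ v) (h2 : v ≤ 10) :
    pyint (PySem.Int.toStr v) = v := by
  interval_cases v <;> decide

lemma aLoop (cs : List Char) : ∀ (pre : List String) (c : Char),
    (∀ d ∈ cs, d.isDigit = true) →
    (PySem.List.pyRange ((pre.length : Int) + cs.length) (pre.length : Int) (-1)).foldl aStep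
      (pre ++ String.ofList [c] :: cs.map (fun d => String.ofList [d]))
    = pre ++ (if (roundAux cs).2 then PySem.Int.toStr (pyintC c + 1) else String.ofList [c])
        :: (roundAux cs).1 := by
  induction cs with
  | nil =>
    intro pre c _
    rw [show ((pre.length : Int) + ([] : List Char).length) = (pre.length : Int) by simp,
      PySem.List.pyRange_neg_one_eq_nil le_rfl]
    simp [roundAux]
  | cons d rest ih =>
    intro pre c hd
    have hlen : ((pre.length : Int) + (d :: rest).length) = (pre.length : Int) + rest.length + 1 := by
      push_cast [List.length_cons]; ring
    rw [hlen, PySem.List.pyRange_neg_one_eq_reverse,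
      PySem.List.pyRange_one_cons (by omega), List.reverse_cons, List.foldl_append]
    have hback : (PySem.List.pyRange ((pre.length : Int) + 1 + 1) ((pre.length : Int) + rest.length + 1 + 1)).reverse
        = PySem.List.pyRange (((pre ++ [String.ofList [c]]).length : Int) + rest.length)
            ((pre ++ [String.ofList [c]]).length : Int) (-1) := by
      rw [PySem.List.pyRange_neg_one_eq_reverse,
        show (((pre ++ [String.ofList [c]]).length : Int)) = (pre.length : Int) + 1 by simp,
        show ((pre.length : Int) + 1) + 1 = (pre.length : Int) + 1 + 1 from rfl,
        show ((pre.length : Int) + 1 + rest.length) + 1 = (pre.length : Int) + rest.length + 1 + 1 by ring]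
    have hlist : pre ++ String.ofList [c] :: (d :: rest).map (fun d => String.ofList [d])
        = (pre ++ [String.ofList [c]]) ++ String.ofList [d] :: rest.map (fun d => String.ofList [d]) := by
      simp
    rw [hlist, hback, ih (pre ++ [String.ofList [c]]) d (fun e he => hd e (List.mem_cons_of_mem _ he))]
    -- now one aStep at index pre.length + 1
    set p := roundAux rest with hp
    set e := (if p.2 then PySem.Int.toStr (pyintC d + 1) else String.ofList [d]) with he
    have hstep : (pre ++ [String.ofList [c]]) ++ e :: p.1
        = pre ++ String.ofList [c] :: e :: p.1 := by simp
    have hidx : ((pre.length : Int) + 1) = (((pre ++ [String.ofList [c]]).length : Int)) := by simp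
    have hget : PySem.List.pyGetD ((pre ++ [String.ofList [c]]) ++ e :: p.1) ((pre.length : Int) + 1) "" = e := by
      rw [hidx, pyGetD_append_cons]
    have hget0 : PySem.List.pyGetD ((pre ++ [String.ofList [c]]) ++ e :: p.1) (((pre.length : Int) + 1) - 1) "" = String.ofList [c] := by
      rw [show ((pre.length : Int) + 1) - 1 = (pre.length : Int) by ring, hstep, pyGetD_append_cons]
    have hv : pyint e = pyintC d + (if p.2 then 1 else 0) := by
      rcases hb : p.2 with _ | _
      · simp [he, hb, pyint, pyintC]
      · have hd0 := pyintC_bounds d (hd d (List.mem_cons_self))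
        simp only [he, hb, if_pos]
        exact pyint_toStr _ (by omega) (by omega)
    have hd1 : roundAux (d :: rest) =
        (let v := pyintC d + (if p.2 then 1 else 0);
         if v ≥ 5 then ("0" :: p.1, true)
         else if p.2 then (PySem.Int.toStr v :: p.1, false)
         else (String.ofList [d] :: p.1, false)) := by
      simp only [roundAux, ← hp]
    unfold aStep
    rw [List.foldl_cons, List.foldl_nil]
    rw [hget, hv]
    by_cases h5 : pyintC d + (if p.2 then 1 else 0) ≥ 5
    · rw [if_pos h5, hget0]
      have ht1 : (((pre.length : Int) + 1)).toNat = (pre ++ [String.ofList [c]]).length := by simp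
      have ht0 : ((((pre.length : Int) + 1)) - 1).toNat = pre.length := by omega
      rw [ht1, ht0]
      rw [show ((pre ++ [String.ofList [c]]) ++ e :: p.1) = (pre ++ [String.ofList [c]]) ++ e :: p.1 from rfl]
      rw [set_append_cons (pre ++ [String.ofList [c]]) e "0" p.1]
      rw [show (pre ++ [String.ofList [c]]) ++ "0" :: p.1 = pre ++ String.ofList [c] :: "0" :: p.1 by simp]
      rw [set_append_cons pre (String.ofList [c]) _ ("0" :: p.1)]
      rw [hd1]
      simp only [ge_iff_le, if_pos h5]
      simp [pyintC]
    · rw [if_neg h5, hd1]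
      simp only [ge_iff_le, if_neg h5]
      rcases hb : p.2 with _ | _ <;> simp [hb, he]

-- ---- B-side lemmas ----

lemma bSkip_stop (l : List Char) (j : Int)
    (h : ¬ (j < (l.length : Int) ∧ PySem.List.pyGetD l j ' ' = '4')) : bSkip l j = j := by
  rw [bSkip, dif_neg h]

lemma bSkip_go (l : List Char) (j : Int)
    (h : j < (l.length : Int) ∧ PySem.List.pyGetD l j ' ' = '4') : bSkip l j = bSkip l (j + 1) := by
  rw [bSkip, dif_pos h]

lemma bSkip_stable (l : List Char) (j : Int) (h : j < bSkip l j) : bSkip l j = bSkip l (j + 1) := by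
  by_cases hc : j < (l.length : Int) ∧ PySem.List.pyGetD l j ' ' = '4'
  · exact bSkip_go l j hc
  · rw [bSkip_stop l j hc] at h; omega

lemma roundAux_cons (c : Char) (rest : List Char) :
    roundAux (c :: rest) =
      ((if 5 ≤ pyintC c + (if (roundAux rest).2 then 1 else 0) then "0"
        else if (roundAux rest).2 then
          PySem.Int.toStr (pyintC c + (if (roundAux rest).2 then 1 else 0))
        else String.ofList [c]) :: (roundAux rest).1,
       decide (5 ≤ pyintC c + (if (roundAux rest).2 then 1 else 0))) := by
  simp only [roundAux, ge_iff_le]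
  split_ifs with h1 h2 <;> simp_all

lemma getD_of_drop (l : List Char) (k : Nat) (c : Char) (rest : List Char)
    (hk : l.drop k = c :: rest) : PySem.List.pyGetD l (k : Int) ' ' = c := by
  have h0 : l[k]? = some c := by
    have h' : (l.drop k)[0]? = some c := by rw [hk]; rfl
    rwa [List.getElem?_drop, Nat.add_zero] at h' 
  rw [PySem.List.pyGetD_natCast, List.getD_eq_getElem?_getD, h0]
  rfl

lemma drop_succ_of_drop (l : List Char) (k : Nat) (c : Char) (rest : List Char)
    (hk : l.drop k = c :: rest) : l.drop (k + 1) = rest := by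
  rw [← List.tail_drop, hk]
  rfl

lemma lt_len_of_drop (l : List Char) (k : Nat) (c : Char) (rest : List Char)
    (hk : l.drop k = c :: rest) : k < l.length := by
  by_contra h
  rw [List.drop_eq_nil_of_le (by omega)] at hk
  exact List.cons_ne_nil c rest hk.symm

-- the lookahead pointer, once past the run of fours, reads off exactly the carry roundAux produces
lemma carryChar : ∀ (fuel : Nat) (l : List Char) (k : Nat), l.length ≤ k + fuel →
    (∀ d ∈ l.drop k, d.isDigit = true) →
    decide (bSkip l (k : Int) < (l.length : Int) ∧ '5' ≤ PySem.List.pyGetD l (bSkip l (k : Int)) ' ')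
      = (roundAux (l.drop k)).2 := by
  intro fuel
  induction fuel with
  | zero =>
    intro l k hf _
    rw [List.drop_eq_nil_of_le (by omega), bSkip_stop l k (by rintro ⟨h, -⟩; omega)]
    exact decide_eq_false (by rintro ⟨h, -⟩; omega)
  | succ fuel ih =>
    intro l k hf hd
    cases hk : l.drop k with
    | nil =>
      have hlen : l.length ≤ k := by rwa [List.drop_eq_nil_iff] at hk
      rw [bSkip_stop l k (by rintro ⟨h, -⟩; omega)]
      exact decide_eq_false (by rintro ⟨h, -⟩; omega)
    | cons c rest =>
      have hklen := lt_len_of_drop l k c rest hk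
      have hc := getD_of_drop l k c rest hk
      have hrest := drop_succ_of_drop l k c rest hk
      have hcd : c.isDigit = true := hd c (by rw [hk]; exact List.mem_cons_self)
      have hrd : ∀ d ∈ l.drop (k + 1), d.isDigit = true := by
        intro d hdm
        rw [hrest] at hdm
        exact hd d (by rw [hk]; exact List.mem_cons_of_mem _ hdm)
      have ihk := ih l (k + 1) (by omega) hrd
      rw [hrest] at ihk
      obtain ⟨hb, h5, h4⟩ := pyintC_digit c hcd
      rw [roundAux_cons]
      by_cases h44 : c = '4'
      · -- the pointer skips over the '4'
        have hcond : (k : Int) < (l.length : Int) ∧ PySem.List.pyGetD l (k : Int) ' ' = '4' :=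
          ⟨by exact_mod_cast hklen, by rw [hc, h44]⟩
        rw [bSkip_go l k hcond,
          show ((k : Int) + 1) = ((k + 1 : Nat) : Int) by push_cast; ring, ihk]
        have h4v : pyintC c = 4 := h4.mpr h44
        rcases hbb : (roundAux rest).2 with _ | _ <;> simp [h4v]
      · -- the pointer stops here
        rw [bSkip_stop l k (by rw [hc]; rintro ⟨-, hx⟩; exact h44 hx), hc]
        have hne4 : pyintC c ≠ 4 := fun hx => h44 (h4.mp hx)
        rcases hbb : (roundAux rest).2 with _ | _ <;> simp only <;>
          rw [decide_eq_decide] <;> constructor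
        · rintro ⟨-, hge⟩; have := h5.mpr hge; omega
        · intro hv
          exact ⟨by exact_mod_cast hklen, h5.mp (by omega)⟩
        · rintro ⟨-, hge⟩; have := h5.mpr hge; omega
        · intro hv
          exact ⟨by exact_mod_cast hklen, h5.mp (by omega)⟩

-- B's loop from position i ≥ 1 onward produces exactly roundAux's output cells
lemma bLoop : ∀ (fuel : Nat) (l : List Char) (i : Nat) (res0 : List String) (j0 : Int),
    1 ≤ i → l.length ≤ i + fuel →
    (∀ d ∈ l.drop i, d.isDigit = true) →
    ((i : Int) < j0 → j0 = bSkip l ((i : Int) + 1)) →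
    ((PySem.List.pyRange (i : Int) (l.length : Int)).foldl (bStep l) (res0, j0)).1
      = res0 ++ (roundAux (l.drop i)).1 := by
  intro fuel
  induction fuel with
  | zero =>
    intro l i res0 j0 h1 hf _ _
    rw [List.drop_eq_nil_of_le (by omega),
      PySem.List.pyRange_one_eq_nil (by exact_mod_cast hf)]
    simp [roundAux]
  | succ fuel ih =>
    intro l i res0 j0 h1 hf hd hinv
    cases hk : l.drop i with
    | nil =>
      have hlen : l.length ≤ i := by rwa [List.drop_eq_nil_iff] at hk
      rw [PySem.List.pyRange_one_eq_nil (by exact_mod_cast hlen)]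
      simp [roundAux]
    | cons c rest =>
      have hilen := lt_len_of_drop l i c rest hk
      have hc := getD_of_drop l i c rest hk
      have hrest := drop_succ_of_drop l i c rest hk
      have hcd : c.isDigit = true := hd c (by rw [hk]; exact List.mem_cons_self)
      have hrd : ∀ d ∈ l.drop (i + 1), d.isDigit = true := by
        intro d hdm
        rw [hrest] at hdm
        exact hd d (by rw [hk]; exact List.mem_cons_of_mem _ hdm)
      rw [PySem.List.pyRange_one_cons (by exact_mod_cast hilen), List.foldl_cons]
      have hj : (if j0 ≤ (i : Int) then bSkip l ((i : Int) + 1) else j0) = bSkip l ((i : Int) + 1) := by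
        by_cases hji : j0 ≤ (i : Int)
        · rw [if_pos hji]
        · rw [if_neg hji, hinv (by omega)]
      have hcarry : decide (bSkip l ((i : Int) + 1) < (l.length : Int) ∧
          '5' ≤ PySem.List.pyGetD l (bSkip l ((i : Int) + 1)) ' ') = (roundAux rest).2 := by
        have h' := carryChar fuel l (i + 1) (by omega) hrd
        rw [hrest] at h'
        rw [show ((i : Int) + 1) = ((i + 1 : Nat) : Int) by push_cast; ring]
        exact h'
      obtain ⟨hb, h5, h4⟩ := pyintC_digit c hcd
      have hstep : bStep l (res0, j0) (i : Int)
          = (res0 ++ [(roundAux (c :: rest)).1.headI], bSkip l ((i : Int) + 1)) := by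
        unfold bStep
        simp only [hj, hcarry, hc, if_neg (show ¬ ((i : Int) = 0) by omega)]
        rw [roundAux_cons]
        rcases hbb : (roundAux rest).2 with _ | _ <;>
          simp only [Bool.false_eq_true, if_false, if_true, add_zero,
            and_false, and_true, or_false, List.headI]
        · by_cases hge : '5' ≤ c
          · rw [if_pos hge, if_pos (h5.mpr hge)]
          · rw [if_neg hge, if_neg (fun hx => hge (h5.mp hx))]
        · by_cases hz : '5' ≤ c ∨ c = '4'
          · rw [if_pos hz, if_pos (by
              rcases hz with hz | hz
              · have := h5.mpr hz; omega
              · have := h4.mpr hz; omega)]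
          · rw [not_or] at hz
            rw [if_neg (not_or.mpr ⟨hz.1, hz.2⟩), if_neg (by
              have h1' : ¬ 5 ≤ pyintC c := fun hx => hz.1 (h5.mp hx)
              have h2' : pyintC c ≠ 4 := fun hx => hz.2 (h4.mp hx)
              omega)]
      rw [hstep]
      have hrec := ih l (i + 1) (res0 ++ [(roundAux (c :: rest)).1.headI]) (bSkip l ((i : Int) + 1))
        (by omega) (by omega) hrd
        (by rw [show ((i + 1 : Nat) : Int) = (i : Int) + 1 by push_cast; ring]
            exact fun h => bSkip_stable l ((i : Int) + 1) h)
      rw [show ((i + 1 : Nat) : Int) = (i : Int) + 1 by push_cast; ring] at hrec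
      rw [hrec, hrest, List.append_assoc]
      congr 1
      rw [roundAux_cons]
      simp [List.headI]

lemma chars_join_nil_flatten (M : List (List Char)) :
    PySem.Chars.join [] M = M.flatten := by
  match M with
  | [] => simp [PySem.Chars.join_nil]
  | [a] => simp [PySem.Chars.join_singleton]
  | a :: b :: r =>
    rw [PySem.Chars.join_cons_cons, chars_join_nil_flatten (b :: r)]
    simp

lemma foldl_append_toList (L : List String) : ∀ (acc : String),
    (L.foldl (· ++ ·) acc).toList = acc.toList ++ (L.map String.toList).flatten := by
  induction L with
  | nil => intro acc; simp
  | cons s L ih => intro acc; simp [List.foldl_cons, ih]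

lemma join_empty_eq_foldl (L : List String) :
    L.foldl (· ++ ·) "" = PySem.Str.join "" L := by
  apply String.toList_inj.mp
  rw [foldl_append_toList, PySem.Str.toList_join,
    show ("" : String).toList = [] from rfl, chars_join_nil_flatten]
  simp

-- ===== VERDICT (by name: the statement is the Claim_ definition above) =====
theorem my_round_spec : Claim_equal_my_round := by
  intro x _ hpre
  unfold Spec_my_round my_round my_round_alt
  obtain ⟨hd, -⟩ := hpre
  cases hx : x.toList with
  | nil =>
    dsimp only
    rw [show ((([] : List Char).map fun c => String.ofList [c]).length : Int) - 1
          = (-1 : Int) by simp,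
      PySem.List.pyRange_neg_one_eq_nil (by norm_num)]
    simp [PySem.List.pyRange_one_eq_nil]
    decide
  | cons c0 cs =>
    rw [hx] at hd
    simp only [List.drop_one, List.tail_cons, List.all_eq_true] at hd
    dsimp only
    -- A side
    rw [show ((((c0 :: cs).map fun c => String.ofList [c]).length : Int) - 1)
          = ((([] : List String).length : Int) + cs.length) by simp,
      show ((c0 :: cs).map fun c => String.ofList [c])
          = [] ++ String.ofList [c0] :: cs.map (fun d => String.ofList [d]) by simp]
    rw [show PySem.List.pyRange ((([] : List String).length : Int) + cs.length) 0 (-1)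
          = PySem.List.pyRange ((([] : List String).length : Int) + cs.length)
              ((([] : List String).length : Int)) (-1) by norm_num]
    rw [aLoop cs [] c0 hd, List.nil_append]
    -- A's second loop: string concatenation of the cells = join of the cells
    rw [PySem.List.foldl_pyRange_zero_pyGetD' _ "" (· ++ ·) "", join_empty_eq_foldl]
    -- B side: peel off iteration i = 0
    rw [PySem.List.pyRange_one_cons (by push_cast [List.length_cons]; omega), List.foldl_cons,
      zero_add]
    have hdrop1 : (c0 :: cs).drop 1 = cs := rfl
    have hcarry0 : decide (bSkip (c0 :: cs) (1 : Int) < ((c0 :: cs).length : Int) ∧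
        '5' ≤ PySem.List.pyGetD (c0 :: cs) (bSkip (c0 :: cs) (1 : Int)) ' ')
        = (roundAux cs).2 := by
      have h' := carryChar cs.length (c0 :: cs) 1 (by simp) (by simpa [hdrop1] using hd)
      rw [hdrop1] at h'
      simpa using h'
    have hstep0 : bStep (c0 :: cs) ([], 0) 0
        = ([(if (roundAux cs).2 then PySem.Int.toStr (pyintC c0 + 1) else String.ofList [c0])],
           bSkip (c0 :: cs) 1) := by
      unfold bStep
      simp only [if_pos (show (0 : Int) ≤ 0 from le_rfl), zero_add]
      rw [hcarry0]
      simp [PySem.List.pyGetD_zero_cons]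
    rw [hstep0]
    have hloop := bLoop cs.length (c0 :: cs) 1
      [(if (roundAux cs).2 then PySem.Int.toStr (pyintC c0 + 1) else String.ofList [c0])]
      (bSkip (c0 :: cs) 1) le_rfl (by simp) (by simpa [hdrop1] using hd)
      (by intro h
          have := bSkip_stable (c0 :: cs) 1 (by exact_mod_cast h)
          simpa using this)
    rw [hdrop1] at hloop
    have hfold : ((PySem.List.pyRange 1 (((c0 :: cs).length : Int))).foldl (bStep (c0 :: cs))
        ([(if (roundAux cs).2 then PySem.Int.toStr (pyintC c0 + 1) else String.ofList [c0])],
         bSkip (c0 :: cs) 1)).1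
        = (if (roundAux cs).2 then PySem.Int.toStr (pyintC c0 + 1) else String.ofList [c0])
            :: (roundAux cs).1 := by
      have := hloop
      simpa using this
    rw [hfold]
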